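-- pv_equiv track=rewrite | github.com/lagosrui/sn5-solver | arc_solver.py | _crop_background
-- ===== SOURCE A (Python) =====
-- Grid = list[list[int]]
--
-- def _crop_background(grid: Grid, bg: int) -> Grid:
--     positions = [
--         (ri, ci) for ri, row in enumerate(grid)
--         for ci, v in enumerate(row) if v != bg
--     ]
--     if not positions:
--         return [r[:] for r in grid]
--     min_r = min(r for r, _ in positions)
--     max_r = max(r for r, _ in positions)
--     min_c = min(c for _, c in positions)
--     max_c = max(c for _, c in positions)
--     return [row[min_c:max_c + 1] for row in grid[min_r:max_r + 1]]
-- ===== SOURCE B (Python) =====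
-- Grid = list[list[int]]
--
-- def _crop_background(grid: Grid, bg: int) -> Grid:
--     found = False
--     min_r = max_r = min_c = max_c = 0
--     for ri, row in enumerate(grid):
--         for ci, v in enumerate(row):
--             if v != bg:
--                 if not found:
--                     found = True
--                     min_r = max_r = ri
--                     min_c = max_c = ci
--                 else:
--                     if ri < min_r: min_r = ri
--                     if ri > max_r: max_r = ri
--                     if ci < min_c: min_c = ci
--                     if ci > max_c: max_c = ci
--     if not found:
--         return [r[:] for r in grid]
--     return [row[min_c:max_c + 1] for row in grid[min_r:max_r + 1]]
-- ===== Notes on version B (the rewrite author's own statement) =====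
-- stated objective: faster
-- what changed: B replaces A's intermediate positions list plus four separate min/max generator scans with a single pass updating four running bounds (constant extra state), cutting the five traversals and the list allocation down to one pass.
import Mathlib
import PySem

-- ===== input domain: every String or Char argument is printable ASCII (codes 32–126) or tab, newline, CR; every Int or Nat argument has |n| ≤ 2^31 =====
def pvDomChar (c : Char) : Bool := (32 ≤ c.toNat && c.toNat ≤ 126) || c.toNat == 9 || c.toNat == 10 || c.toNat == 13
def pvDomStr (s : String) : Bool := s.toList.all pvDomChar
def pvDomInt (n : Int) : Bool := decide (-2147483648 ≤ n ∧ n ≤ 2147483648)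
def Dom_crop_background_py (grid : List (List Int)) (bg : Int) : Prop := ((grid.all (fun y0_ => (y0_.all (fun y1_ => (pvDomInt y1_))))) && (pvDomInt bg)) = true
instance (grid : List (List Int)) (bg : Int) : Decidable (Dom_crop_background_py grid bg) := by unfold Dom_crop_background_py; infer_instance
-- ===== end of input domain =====

-- B replaces A's build-a-positions-list-then-four-min/max-scans with one combined
-- tracking pass over the grid (objective: simpler single pass, no intermediate list).

-- ===== PORT A =====
def crop_background_py (grid : List (List Int)) (bg : Int) : List (List Int) :=
  let positions : List (Int × Int) :=
    (PySem.List.enumerate grid 0).flatMap (fun p =>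
      (PySem.List.enumerate p.2 0).filterMap (fun q =>
        if q.2 ≠ bg then some (p.1, q.1) else none))
  match positions with
  | [] => grid.map (fun r => r)
  | _ :: _ =>
    let min_r := (PySem.List.min? (positions.map Prod.fst) (fun x => x)).getD 0
    let max_r := (PySem.List.max? (positions.map Prod.fst) (fun x => x)).getD 0
    let min_c := (PySem.List.min? (positions.map Prod.snd) (fun x => x)).getD 0
    let max_c := (PySem.List.max? (positions.map Prod.snd) (fun x => x)).getD 0
    (PySem.List.slice grid (some min_r) (some (max_r + 1))).map
      (fun row => PySem.List.slice row (some min_c) (some (max_c + 1)))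

-- ===== PORT B =====
-- running bounds state: none = nothing found yet (B's `found` flag)
def cropUpd (acc : Option (Int × Int × Int × Int)) (rc : Int × Int) :
    Option (Int × Int × Int × Int) :=
  match acc with
  | none => some (rc.1, rc.1, rc.2, rc.2)
  | some (a, b, c, d) => some (min a rc.1, max b rc.1, min c rc.2, max d rc.2)

def crop_background_py_alt (grid : List (List Int)) (bg : Int) : List (List Int) :=
  let st : Option (Int × Int × Int × Int) :=
    (PySem.List.enumerate grid 0).foldl (fun acc p =>
      (PySem.List.enumerate p.2 0).foldl (fun acc q =>
        if q.2 ≠ bg then cropUpd acc (p.1, q.1) else acc) acc) none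
  match st with
  | none => grid.map (fun r => r)
  | some (mr, xr, mc, xc) =>
    (PySem.List.slice grid (some mr) (some (xr + 1))).map
      (fun row => PySem.List.slice row (some mc) (some (xc + 1)))

-- ===== PRECONDITION & SPEC =====
def Spec_crop_background_py (grid : List (List Int)) (bg : Int) (out : List (List Int)) : Prop := out = crop_background_py_alt grid bg
instance (grid : List (List Int)) (bg : Int) (out : List (List Int)) : Decidable (Spec_crop_background_py grid bg out) := by unfold Spec_crop_background_py; infer_instance

-- ===== CLAIM (what is proved, stated in full; the proofs are below) =====
def Claim_equal_crop_background_py : Prop := ∀ (grid : List (List Int)) (bg : Int), Dom_crop_background_py grid bg → Spec_crop_background_py grid bg (crop_background_py grid bg)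

-- ===== LEMMAS AND PROOFS =====

-- B's nested tracking fold over the grid = folding cropUpd over A's positions list
theorem alt_fold_eq_foldl_positions (grid : List (List Int)) (bg : Int)
    (init : Option (Int × Int × Int × Int)) :
    (PySem.List.enumerate grid 0).foldl (fun acc p =>
        (PySem.List.enumerate p.2 0).foldl (fun acc q =>
          if q.2 ≠ bg then cropUpd acc (p.1, q.1) else acc) acc) init
    = ((PySem.List.enumerate grid 0).flatMap (fun p =>
        (PySem.List.enumerate p.2 0).filterMap (fun q =>
          if q.2 ≠ bg then some (p.1, q.1) else none))).foldl cropUpd init := by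
  rw [List.foldl_flatMap]
  congr 1
  funext acc p
  rw [List.foldl_filterMap]
  congr 1
  funext a q
  by_cases h : q.2 ≠ bg <;> simp [h]

-- folding cropUpd from a some-state tracks the four running extrema
theorem foldl_cropUpd_some (ps : List (Int × Int)) (a b c d : Int) :
    ps.foldl cropUpd (some (a, b, c, d)) =
      some ((ps.map Prod.fst).foldl min a, (ps.map Prod.fst).foldl max b,
            (ps.map Prod.snd).foldl min c, (ps.map Prod.snd).foldl max d) := by
  induction ps generalizing a b c d with
  | nil => rfl
  | cons p t ih => simp [cropUpd, ih]

theorem foldl_cropUpd_none_cons (p : Int × Int) (t : List (Int × Int)) :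
    (p :: t).foldl cropUpd none =
      some ((t.map Prod.fst).foldl min p.1, (t.map Prod.fst).foldl max p.1,
            (t.map Prod.snd).foldl min p.2, (t.map Prod.snd).foldl max p.2) := by
  simp [List.foldl_cons, cropUpd, foldl_cropUpd_some]

-- ===== VERDICT (by name: the statement is the Claim_ definition above) =====
theorem crop_background_py_spec : Claim_equal_crop_background_py := by
  intro grid bg _
  show _ = _
  unfold crop_background_py crop_background_py_alt
  rw [alt_fold_eq_foldl_positions]
  cases hpos : (PySem.List.enumerate grid 0).flatMap (fun p =>
      (PySem.List.enumerate p.2 0).filterMap (fun q =>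
        if q.2 ≠ bg then some (p.1, q.1) else none)) with
  | nil => simp
  | cons p t =>
      rw [foldl_cropUpd_none_cons]
      simp only [List.map_cons, PySem.List.min?_id_cons, PySem.List.max?_id_cons,
        Option.getD_some]
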